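-- pv_equiv track=rewrite | github.com/d41689/ValuePilot | backend/scripts/fields_extracting.py | has_long_upper_run
-- ===== SOURCE A (Python) =====
-- def has_long_upper_run(s: str, min_run: int = 6) -> bool:
--     """Return True if string contains a contiguous run of uppercase letters of length >= min_run.
--
--     Helps detect headings that are concatenated without spaces, e.g. "CAPITALSTRUCTUREasof6/30/25".
--     """
--
--     run = 0
--     for ch in s:
--         if ch.isalpha() and ch.isupper():
--             run += 1
--             if run >= min_run:
--                 return True
--         else:
--             run = 0
--     return False
-- ===== SOURCE B (Python) =====
-- from itertools import groupby
--
--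
-- def has_long_upper_run(s: str, min_run: int = 6) -> bool:
--     """Return True if string contains a contiguous run of uppercase letters of length >= min_run.
--
--     Helps detect headings that are concatenated without spaces, e.g. "CAPITALSTRUCTUREasof6/30/25".
--     """
--     for is_upper, group in groupby(s, key=lambda ch: ch.isalpha() and ch.isupper()):
--         if is_upper and sum(1 for _ in group) >= min_run:
--             return True
--     return False
-- ===== Notes on version B (the rewrite author's own statement) =====
-- stated objective: idiomatic
-- what changed: Replaced the hand-threaded running counter with itertools.groupby: the string is partitioned into maximal same-key runs first, then each uppercase run's length is measured and compared to min_run.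
import Mathlib
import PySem

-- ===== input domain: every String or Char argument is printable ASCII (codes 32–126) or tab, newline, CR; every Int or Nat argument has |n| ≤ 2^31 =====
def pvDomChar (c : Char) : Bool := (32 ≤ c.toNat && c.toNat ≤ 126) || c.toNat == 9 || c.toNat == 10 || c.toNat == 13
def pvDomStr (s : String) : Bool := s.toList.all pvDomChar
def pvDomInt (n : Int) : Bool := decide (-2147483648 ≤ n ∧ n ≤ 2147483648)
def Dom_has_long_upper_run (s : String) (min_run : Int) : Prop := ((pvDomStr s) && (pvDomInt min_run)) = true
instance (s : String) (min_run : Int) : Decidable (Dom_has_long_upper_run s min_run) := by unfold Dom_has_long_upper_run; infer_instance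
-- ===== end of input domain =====

-- B replaces A's hand-threaded running counter by a groupby-style partition into
-- maximal runs followed by a length check per uppercase run (idiomatic decomposition).


-- the key predicate both programs use: ch.isalpha() and ch.isupper()
def pvKey (c : Char) : Bool := PySem.Chars.isalpha c && PySem.Chars.isupper c

-- ===== PORT A =====
-- A's flat loop: a running counter, reset on non-uppercase, early return on reaching min_run
def pvALoop (m : Int) : List Char → Int → Bool
  | [], _ => false
  | c :: cs, run =>
    if pvKey c then
      if m ≤ run + 1 then true else pvALoop m cs (run + 1)
    else pvALoop m cs 0

def has_long_upper_run (s : String) (min_run : Int) : Bool :=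
  pvALoop min_run s.toList 0

-- ===== PORT B =====
-- itertools.groupby(s, key=pvKey): the maximal runs as (key, length) pairs
def pvRuns : List Char → List (Bool × Int)
  | [] => []
  | c :: cs =>
    match pvRuns cs with
    | (k, n) :: rest =>
        if pvKey c == k then (k, n + 1) :: rest
        else (pvKey c, 1) :: (k, n) :: rest
    | [] => [(pvKey c, 1)]

def has_long_upper_run_alt (s : String) (min_run : Int) : Bool :=
  (pvRuns s.toList).any (fun g => g.1 && decide (min_run ≤ g.2))

-- ===== PRECONDITION & SPEC =====
def Spec_has_long_upper_run (s : String) (min_run : Int) (out : Bool) : Prop := out = has_long_upper_run_alt s min_run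
instance (s : String) (min_run : Int) (out : Bool) : Decidable (Spec_has_long_upper_run s min_run out) := by unfold Spec_has_long_upper_run; infer_instance

-- ===== CLAIM (what is proved, stated in full; the proofs are below) =====
def Claim_equal_has_long_upper_run : Prop := ∀ (s : String) (min_run : Int), Dom_has_long_upper_run s min_run → Spec_has_long_upper_run s min_run (has_long_upper_run s min_run)

-- ===== LEMMAS AND PROOFS =====

-- every run produced by pvRuns has length ≥ 1
theorem pvRuns_pos (l : List Char) : ∀ g ∈ pvRuns l, 1 ≤ g.2 := by
  induction l with
  | nil => simp [pvRuns]
  | cons c cs ih =>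
    simp only [pvRuns]
    cases h : pvRuns cs with
    | nil => simp
    | cons g rest =>
      obtain ⟨k, n⟩ := g
      have hn : (1:Int) ≤ n := by have := ih (k, n); simp [h] at this; exact this
      have hrest : ∀ g ∈ rest, (1:Int) ≤ g.2 := by
        intro g hg; exact ih g (h ▸ List.mem_cons_of_mem _ hg)
      by_cases hk : pvKey c == k
      · simp only [hk, if_true]
        intro g hg
        rcases List.mem_cons.1 hg with rfl | hg
        · simpa using by omega
        · exact hrest g hg
      · simp only [hk, if_false, Bool.false_eq_true]
        intro g hg
        rcases List.mem_cons.1 hg with rfl | hg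
        · simp
        · rcases List.mem_cons.1 hg with rfl | hg
          · simpa using hn
          · exact hrest g hg

-- A's loop state (run) boosts the first run of the remaining runs when that run is uppercase
def pvBoost (m run : Int) : List (Bool × Int) → Bool
  | (true, n) :: rest => decide (m ≤ run + n) || rest.any (fun g => g.1 && decide (m ≤ g.2))
  | gs => gs.any (fun g => g.1 && decide (m ≤ g.2))

theorem pvALoop_eq_boost (m : Int) (l : List Char) :
    ∀ run : Int, pvALoop m l run = pvBoost m run (pvRuns l) := by
  induction l with
  | nil => intro run; simp [pvALoop, pvRuns, pvBoost]
  | cons c cs ih =>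
    intro run
    simp only [pvALoop, pvRuns]
    cases hk : pvKey c with
    | true =>
      cases h : pvRuns cs with
      | nil =>
        rw [ih (run + 1), h]
        by_cases hm : m ≤ run + 1 <;> simp [pvBoost, hm]
      | cons g rest =>
        obtain ⟨k, n⟩ := g
        have hn : (1:Int) ≤ n := by have := pvRuns_pos cs (k, n); simp [h] at this; exact this
        rw [ih (run + 1), h]
        cases k with
        | true =>
          simp only [pvBoost, beq_self_eq_true, if_pos]
          by_cases hm : m ≤ run + 1
          · have : m ≤ run + (n + 1) := by omega
            simp [hm, this]
          · have : run + 1 + n = run + (n + 1) := by omega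
            simp [hm, this]
        | false =>
          simp only [pvBoost]
          by_cases hm : m ≤ run + 1 <;> simp [hm, List.any_cons]
    | false =>
      simp only [Bool.false_eq_true, ite_false]
      cases h : pvRuns cs with
      | nil =>
        rw [ih 0, h]; simp [pvBoost]
      | cons g rest =>
        obtain ⟨k, n⟩ := g
        rw [ih 0, h]
        cases k with
        | true => simp [pvBoost, List.any_cons]
        | false => simp [pvBoost, List.any_cons]

theorem pvBoost_zero (m : Int) (gs : List (Bool × Int)) :
    pvBoost m 0 gs = gs.any (fun g => g.1 && decide (m ≤ g.2)) := by
  cases gs with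
  | nil => simp [pvBoost]
  | cons g rest =>
    obtain ⟨k, n⟩ := g
    cases k with
    | true => simp [pvBoost, List.any_cons]
    | false => simp [pvBoost]

-- ===== VERDICT (by name: the statement is the Claim_ definition above) =====
theorem has_long_upper_run_spec : Claim_equal_has_long_upper_run := by
  intro s min_run _
  unfold Spec_has_long_upper_run has_long_upper_run has_long_upper_run_alt
  rw [pvALoop_eq_boost, pvBoost_zero]
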